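-- pv_equiv track=rewrite | github.com/vikpek/aligulac | aligulac/ratings/staff_views.py | find_dashes
-- ===== SOURCE A (Python) =====
-- def find_dashes(line):
--     in_quote = False
--     dashes = []
--
--     for ind, c in enumerate(line):
--         if c == '"':
--             in_quote = not in_quote
--         elif c == '-' and not in_quote:
--             dashes.append(ind)
--
--     return dashes
-- ===== SOURCE B (Python) =====
-- def find_dashes(line):
--     dashes = []
--     offset = 0
--     for i, seg in enumerate(line.split('"')):
--         if i % 2 == 0:
--             for j, c in enumerate(seg):
--                 if c == '-':
--                     dashes.append(offset + j)
--         offset += len(seg) + 1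
--     return dashes
-- ===== Notes on version B (the rewrite author's own statement) =====
-- stated objective: alternative
-- what changed: Replaces A's per-character in_quote toggle with a structural split on '"': B scans only even-indexed segments of line.split('"'), tracking a running offset into the original string.
import Mathlib
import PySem

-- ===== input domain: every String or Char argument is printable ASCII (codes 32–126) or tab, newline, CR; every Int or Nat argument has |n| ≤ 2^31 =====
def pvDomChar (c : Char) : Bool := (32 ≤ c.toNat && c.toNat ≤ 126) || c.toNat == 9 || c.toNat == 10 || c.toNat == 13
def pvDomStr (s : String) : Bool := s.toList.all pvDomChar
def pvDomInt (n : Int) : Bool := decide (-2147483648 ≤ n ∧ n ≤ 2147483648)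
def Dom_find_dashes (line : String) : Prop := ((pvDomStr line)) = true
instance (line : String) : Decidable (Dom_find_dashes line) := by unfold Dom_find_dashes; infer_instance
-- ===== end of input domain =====

-- B replaces A's in_quote toggle by splitting on '"' and scanning only even-indexed
-- segments with a running offset (objective: alternative decomposition, same cost).

-- ===== PORT A =====
def find_dashes (line : String) : List Int :=
  ((PySem.List.enumerate line.toList 0).foldl
    (fun st ic =>
      if ic.2 = '"' then (!st.1, st.2)
      else if ic.2 = '-' ∧ st.1 = false then (st.1, st.2 ++ [ic.1])
      else st)
    (false, ([] : List Int))).2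

-- ===== PORT B =====
-- inner loop of Source B: dash positions inside one segment, shifted by offset
def altSeg (offset : Int) (seg : List Char) : List Int :=
  (PySem.List.enumerate seg 0).foldl
    (fun acc jc => if jc.2 = '-' then acc ++ [offset + jc.1] else acc) []

-- line.split('"') is ported by the corresponding library function List.splitOn (exact for a one-char separator)
def find_dashes_alt (line : String) : List Int :=
  ((PySem.List.enumerate (line.toList.splitOn '"') 0).foldl
    (fun st p =>
      ((if PySem.Int.mod p.1 2 = 0 then st.1 ++ altSeg st.2 p.2 else st.1),
       st.2 + p.2.length + 1))
    (([] : List Int), (0 : Int))).1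

-- ===== PRECONDITION & SPEC =====
def Spec_find_dashes (line : String) (out : List Int) : Prop := out = find_dashes_alt line
instance (line : String) (out : List Int) : Decidable (Spec_find_dashes line out) := by unfold Spec_find_dashes; infer_instance

-- ===== CLAIM (what is proved, stated in full; the proofs are below) =====
def Claim_equal_find_dashes : Prop := ∀ (line : String), Dom_find_dashes line → Spec_find_dashes line (find_dashes line)

-- ===== LEMMAS AND PROOFS =====

-- reference recursion: A's toggle scan
def pvScan : List Char → Int → Bool → List Int
  | [], _, _ => []
  | c :: cs, i, q =>
    if c = '"' then pvScan cs (i+1) (!q)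
    else if c = '-' ∧ q = false then i :: pvScan cs (i+1) q
    else pvScan cs (i+1) q

-- dash positions of one segment, as a structural recursion
def pvDash : List Char → Int → List Int
  | [], _ => []
  | c :: cs, i => (if c = '-' then [i] else []) ++ pvDash cs (i + 1)

-- B's outer loop as a structural recursion over the segment list
def pvSegs : List (List Char) → Int → Bool → List Int
  | [], _, _ => []
  | seg :: rest, off, ev =>
    (if ev then pvDash seg off else []) ++ pvSegs rest (off + seg.length + 1) (!ev)

lemma foldA (cs : List Char) (i : Int) (q : Bool) (acc : List Int) :
    ((PySem.List.enumerate cs i).foldl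
      (fun st ic =>
        if ic.2 = '"' then (!st.1, st.2)
        else if ic.2 = '-' ∧ st.1 = false then (st.1, st.2 ++ [ic.1])
        else st)
      (q, acc)).2 = acc ++ pvScan cs i q := by
  induction cs generalizing i q acc with
  | nil => simp [PySem.List.enumerate_nil, pvScan]
  | cons c cs ih =>
    rw [PySem.List.enumerate_cons]
    simp only [List.foldl_cons, pvScan]
    by_cases h1 : c = '"' <;> by_cases h2 : (c = '-' ∧ q = false) <;>
      simp [h1, h2, ih]

lemma foldSeg (seg : List Char) (off j : Int) (acc : List Int) :
    (PySem.List.enumerate seg j).foldl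
      (fun acc jc => if jc.2 = '-' then acc ++ [off + jc.1] else acc) acc
      = acc ++ pvDash seg (off + j) := by
  induction seg generalizing j acc with
  | nil => simp [PySem.List.enumerate_nil, pvDash]
  | cons c cs ih =>
    rw [PySem.List.enumerate_cons]
    simp only [List.foldl_cons, pvDash]
    by_cases h1 : c = '-' <;> simp [h1, ih, add_assoc]

lemma altSeg_eq (off : Int) (seg : List Char) : altSeg off seg = pvDash seg off := by
  simpa using foldSeg seg off 0 []

lemma foldB (segs : List (List Char)) (k off : Int) (acc : List Int) :
    ((PySem.List.enumerate segs k).foldl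
      (fun st p =>
        ((if PySem.Int.mod p.1 2 = 0 then st.1 ++ altSeg st.2 p.2 else st.1),
         st.2 + p.2.length + 1))
      (acc, off)).1 = acc ++ pvSegs segs off (decide (k % 2 = 0)) := by
  induction segs generalizing k off acc with
  | nil => simp [PySem.List.enumerate_nil, pvSegs]
  | cons s ss ih =>
    rw [PySem.List.enumerate_cons]
    simp only [List.foldl_cons, ih]
    have hpar : (decide ((k + 1) % 2 = 0)) = !(decide (k % 2 = 0)) := by
      by_cases h : k % 2 = 0 <;> simp [h] <;> omega
    rw [hpar, PySem.Int.mod_eq_emod_of_pos (a := k) (by omega : (0:Int) < 2)]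
    by_cases h : k % 2 = 0 <;> simp [h, pvSegs, altSeg_eq]

lemma segs_scan (cs : List Char) (off : Int) (ev : Bool) :
    pvSegs (cs.splitOn '"') off ev = pvScan cs off (!ev) := by
  induction cs generalizing off ev with
  | nil => simp [List.splitOn, pvSegs, pvScan, pvDash]
  | cons c cs ih =>
    by_cases hc : c = '"'
    · subst hc
      rw [show ('"' :: cs).splitOn '"' = [] :: cs.splitOn '"' by
        simp [List.splitOn, List.splitOnP_cons]]
      simp only [pvSegs, pvScan, ih]
      simp [pvDash]
    · obtain ⟨s, ss, hs⟩ : ∃ s ss, cs.splitOn '"' = s :: ss := by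
        rcases h : cs.splitOn '"' with _ | ⟨s, ss⟩
        · exact absurd h (List.splitOnP_ne_nil _ cs)
        · exact ⟨s, ss, rfl⟩
      have hs' : cs.splitOnP (· == '"') = s :: ss := hs
      have hsplit : (c :: cs).splitOn '"' = (c :: s) :: ss := by
        simp [List.splitOn, List.splitOnP_cons, hc, hs']
      rw [hsplit]
      have hIH := ih (off + 1) ev
      rw [hs] at hIH
      simp only [pvSegs] at hIH
      have hoff : off + ((c :: s).length : Int) + 1 = off + 1 + (s.length : Int) + 1 := by
        push_cast [List.length_cons]; ring
      rw [show pvSegs ((c :: s) :: ss) off ev =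
            (if ev then pvDash (c :: s) off else []) ++
              pvSegs ss (off + ((c :: s).length : Int) + 1) (!ev) from rfl,
          hoff,
          show pvDash (c :: s) off = (if c = '-' then [off] else []) ++ pvDash s (off + 1) from rfl]
      by_cases hev : ev <;> by_cases hd : c = '-' <;>
        simp [pvScan, hc, hd, hev] <;> simpa [hev] using hIH

-- ===== VERDICT (by name: the statement is the Claim_ definition above) =====
theorem find_dashes_spec : Claim_equal_find_dashes := by
  intro line _
  unfold Spec_find_dashes find_dashes find_dashes_alt
  rw [foldA, foldB, segs_scan]
  simp
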